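-- pv_equiv track=rewrite | github.com/SeanTDA/dreamwords-placeholder | python/wordmaker5000/04_daydreammaker.py | has_matching_letters
-- ===== SOURCE A (Python) =====
-- def has_matching_letters(words):
--     for i, word1 in enumerate(words):
--         for j, word2 in enumerate(words):
--             if i != j:
--                 if any(letter in word2 for letter in word1):
--                     break
--         else:
--             return False
--     return True
-- ===== SOURCE B (Python) =====
-- def has_matching_letters(words):
--     cnt = {}
--     for w in words:
--         for letter in set(w):
--             cnt[letter] = cnt.get(letter, 0) + 1
--     return all(any(cnt.get(letter, 0) >= 2 for letter in w) for w in words)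
-- ===== Notes on version B (the rewrite author's own statement) =====
-- stated objective: faster
-- what changed: Replaces the all-pairs word comparison with a single pass that counts, per letter, how many words contain it; a word then matches iff one of its letters occurs in at least two words.
import Mathlib
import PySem

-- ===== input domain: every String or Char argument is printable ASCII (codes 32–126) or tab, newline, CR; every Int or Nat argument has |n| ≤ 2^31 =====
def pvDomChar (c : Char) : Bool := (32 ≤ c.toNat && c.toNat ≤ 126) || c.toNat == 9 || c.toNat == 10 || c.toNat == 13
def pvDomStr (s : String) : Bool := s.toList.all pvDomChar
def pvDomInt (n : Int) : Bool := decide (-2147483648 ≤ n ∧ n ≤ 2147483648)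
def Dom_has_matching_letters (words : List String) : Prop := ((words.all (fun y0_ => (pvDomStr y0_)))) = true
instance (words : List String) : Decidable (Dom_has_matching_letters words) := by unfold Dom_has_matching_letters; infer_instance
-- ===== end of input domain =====

-- B replaces A's all-pairs scan by one pass counting, per letter, the words containing it; a word matches iff some letter of it occurs in ≥ 2 words.


-- ===== PORT A =====
-- inner loop 'for j, word2 in enumerate(words): if i != j: if any(letter in word2 for letter in word1): break';
-- returns true iff the break fired ('letter in word2' on a 1-char letter is exactly char membership).
def hmInner (i : Int) (w1 : List Char) : List (Int × List Char) → Bool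
  | [] => false
  | (j, w2) :: rest =>
      if i ≠ j then
        if w1.any (fun c => w2.contains c) then true else hmInner i w1 rest
      else hmInner i w1 rest

-- outer loop 'for i, word1 in enumerate(words): … else: return False', final 'return True'
def hmOuter (all : List (Int × List Char)) : List (Int × List Char) → Bool
  | [] => true
  | (i, w1) :: rest => if hmInner i w1 all then hmOuter all rest else false

def has_matching_letters (words : List String) : Bool :=
  let ws := PySem.List.enumerate (words.map String.toList) 0
  hmOuter ws ws

-- ===== PORT B =====
def has_matching_letters_alt (words : List String) : Bool :=
  let ls := words.map String.toList
  let cnt : PySem.Dict Char Int := ls.foldl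
    (fun d w => (PySem.Set.ofList w).foldl (fun d l => d.modify l 0 (· + 1)) d)
    PySem.Dict.empty
  ls.all (fun w => w.any (fun l => 2 ≤ cnt.getD l 0))

-- ===== PRECONDITION & SPEC =====
def Spec_has_matching_letters (words : List String) (out : Bool) : Prop := out = has_matching_letters_alt words
instance (words : List String) (out : Bool) : Decidable (Spec_has_matching_letters words out) := by unfold Spec_has_matching_letters; infer_instance

-- ===== CLAIM (what is proved, stated in full; the proofs are below) =====
def Claim_equal_has_matching_letters : Prop := ∀ (words : List String), Dom_has_matching_letters words → Spec_has_matching_letters words (has_matching_letters words)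

-- ===== LEMMAS AND PROOFS =====

theorem hmInner_true_iff (i : Int) (w1 : List Char) (l : List (Int × List Char)) :
    hmInner i w1 l = true ↔ ∃ p ∈ l, p.1 ≠ i ∧ ∃ c ∈ w1, p.2.contains c := by
  induction l with
  | nil => simp [hmInner]
  | cons q rest ih =>
    obtain ⟨j, w2⟩ := q
    by_cases hij : i = j
    · subst hij
      simp only [hmInner, if_neg (fun h : i ≠ i => h rfl), ih]
      constructor
      · rintro ⟨p, hp, hne, hc⟩; exact ⟨p, List.mem_cons_of_mem _ hp, hne, hc⟩
      · rintro ⟨p, hp, hne, hc⟩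
        rcases List.mem_cons.mp hp with rfl | hp'
        · exact absurd rfl hne
        · exact ⟨p, hp', hne, hc⟩
    · simp only [hmInner, if_pos (hij : i ≠ j)]
      by_cases hany : w1.any (fun c => w2.contains c) = true
      · simp only [if_pos hany, true_iff]
        exact ⟨(j, w2), List.mem_cons_self, fun h => hij h.symm, by simpa using hany⟩
      · simp only [if_neg hany, ih]
        constructor
        · rintro ⟨p, hp, hne, hc⟩; exact ⟨p, List.mem_cons_of_mem _ hp, hne, hc⟩
        · rintro ⟨p, hp, hne, hc⟩
          rcases List.mem_cons.mp hp with rfl | hp'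
          · exact absurd (List.any_eq_true.mpr hc) hany
          · exact ⟨p, hp', hne, hc⟩

theorem hmOuter_eq_all (all l : List (Int × List Char)) :
    hmOuter all l = l.all (fun p => hmInner p.1 p.2 all) := by
  induction l with
  | nil => rfl
  | cons q rest ih =>
    obtain ⟨i, w1⟩ := q
    simp only [hmOuter, List.all_cons, ih]
    by_cases h : hmInner i w1 all = true <;> simp [h]

-- two distinct indices satisfying p give countP ≥ 2
theorem two_le_countP {α : Type} (p : α → Bool) :
    ∀ (ls : List α) (k1 k2 : Nat) (h1 : k1 < ls.length) (h2 : k2 < ls.length),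
      k1 ≠ k2 → p ls[k1] = true → p ls[k2] = true → 2 ≤ ls.countP p := by
  intro ls
  induction ls with
  | nil => intro k1 k2 h1; simp at h1
  | cons a t ih =>
    intro k1 k2 h1 h2 hne hp1 hp2
    match k1, k2 with
    | 0, 0 => exact absurd rfl hne
    | 0, m + 1 =>
      have hm : m < t.length := by simpa using h2
      have hpt : 0 < t.countP p :=
        List.countP_pos_iff.mpr ⟨t[m], t.getElem_mem hm, by simpa using hp2⟩
      have hpa : p a = true := by simpa using hp1
      have hstep := List.countP_cons_of_pos (l := t) (a := a) hpa
      omega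
    | m + 1, 0 =>
      have hm : m < t.length := by simpa using h1
      have hpt : 0 < t.countP p :=
        List.countP_pos_iff.mpr ⟨t[m], t.getElem_mem hm, by simpa using hp1⟩
      have hpa : p a = true := by simpa using hp2
      have hstep := List.countP_cons_of_pos (l := t) (a := a) hpa
      omega
    | m + 1, n + 1 =>
      have hih := ih m n (by simpa using h1) (by simpa using h2)
        (by omega) (by simpa using hp1) (by simpa using hp2)
      by_cases hpa : p a = true <;> simp only [List.countP_cons, hpa] <;> omega

-- countP ≥ 2 and p at index ki give p at some other index
theorem exists_ne_of_two_le_countP {α : Type} (p : α → Bool) :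
    ∀ (ls : List α) (ki : Nat) (hki : ki < ls.length),
      p ls[ki] = true → 2 ≤ ls.countP p →
      ∃ k, ∃ hk : k < ls.length, k ≠ ki ∧ p ls[k] = true := by
  intro ls
  induction ls with
  | nil => intro ki h; simp at h
  | cons a t ih =>
    intro ki hki hp hcnt
    match ki with
    | 0 =>
      have hpa : p a = true := by simpa using hp
      have ht : 0 < t.countP p := by
        have hstep := List.countP_cons_of_pos (l := t) (a := a) hpa
        omega
      obtain ⟨x, hx, hpx⟩ := List.countP_pos_iff.mp ht
      obtain ⟨m, hm, rfl⟩ := List.mem_iff_getElem.mp hx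
      exact ⟨m + 1, by simpa using hm, by omega, by simpa using hpx⟩
    | m + 1 =>
      by_cases hpa : p a = true
      · exact ⟨0, by exact Nat.succ_pos _, by omega, by simpa using hpa⟩
      · have hcnt' : 2 ≤ t.countP p := by
          simpa [List.countP_cons, hpa] using hcnt
        obtain ⟨k, hk, hkne, hpk⟩ :=
          ih m (by simpa using hki) (by simpa using hp) hcnt'
        exact ⟨k + 1, by simpa using hk, by omega, by simpa using hpk⟩

-- the counter dict built by B holds, per letter, the number of words containing it
theorem cnt_getD (ls : List (List Char)) (c : Char) (d : PySem.Dict Char Int) :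
    (ls.foldl (fun d w => (PySem.Set.ofList w).foldl (fun d l => d.modify l 0 (· + 1)) d) d).getD c 0
      = d.getD c 0 + (ls.countP (fun w => w.contains c) : Int) := by
  induction ls generalizing d with
  | nil => simp
  | cons w t ih =>
    simp only [List.foldl_cons, ih, PySem.Dict.getD_foldl_modify_add_one]
    have hcount : ((PySem.Set.ofList w).count c : Int) =
        if w.contains c then 1 else 0 := by
      by_cases hc : c ∈ w
      · rw [List.count_eq_one_of_mem (PySem.Set.nodup_ofList w)
            (by simpa [PySem.Set.mem_ofList] using hc)]
        simp [hc]
      · rw [List.count_eq_zero.mpr (by simpa [PySem.Set.mem_ofList] using hc)]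
        simp [hc]
    rw [hcount, List.countP_cons]
    split_ifs <;> push_cast <;> ring

-- per-word bridge: A's inner loop fires for word ls[ki] iff some letter of it lies in ≥ 2 words
theorem inner_iff_count (ls : List (List Char)) (ki : Nat) (hki : ki < ls.length) :
    hmInner (ki : Int) ls[ki] (PySem.List.enumerate ls 0) = true ↔
      ∃ c ∈ ls[ki], 2 ≤ ls.countP (fun w => w.contains c) := by
  rw [hmInner_true_iff]
  constructor
  · rintro ⟨p, hp, hne, c, hc, hcw⟩
    obtain ⟨k, hk, rfl⟩ := (PySem.List.mem_enumerate_iff _ _ _).mp hp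
    simp only [zero_add] at hne
    have hkne : k ≠ ki := fun h => hne (by simp [h])
    exact ⟨c, hc, two_le_countP _ ls ki k hki hk hkne.symm (by simpa using hc) hcw⟩
  · rintro ⟨c, hc, hcnt⟩
    obtain ⟨k, hk, hkne, hpk⟩ :=
      exists_ne_of_two_le_countP (fun w => w.contains c) ls ki hki (by simpa using hc) hcnt
    refine ⟨((k : Int), ls[k]), ?_, ?_, c, hc, hpk⟩
    · exact (PySem.List.mem_enumerate_iff _ _ _).mpr ⟨k, hk, by simp⟩
    · exact fun h => hkne (Nat.cast_inj.mp h)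

theorem main_eq (words : List String) :
    has_matching_letters words = has_matching_letters_alt words := by
  unfold has_matching_letters has_matching_letters_alt
  rw [hmOuter_eq_all]
  have hc : ∀ l : Char,
      ((words.map String.toList).foldl
        (fun d w => (PySem.Set.ofList w).foldl (fun d l => d.modify l 0 (· + 1)) d)
        PySem.Dict.empty).getD l 0
      = ((words.map String.toList).countP (fun w => w.contains l) : Int) := by
    intro l
    rw [cnt_getD]
    simp [PySem.Dict.empty]
    rfl
  set ls := words.map String.toList with hls
  rw [Bool.eq_iff_iff]
  simp only [List.all_eq_true, List.any_eq_true, decide_eq_true_eq]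
  constructor
  · intro hA w hw
    obtain ⟨k, hk, rfl⟩ := List.mem_iff_getElem.mp hw
    have h := hA _ ((PySem.List.mem_enumerate_iff _ _ _).mpr ⟨k, hk, rfl⟩)
    obtain ⟨c, hc', hcnt⟩ := (inner_iff_count ls k hk).mp (by simpa using h)
    refine ⟨c, hc', ?_⟩
    rw [hc c]
    exact_mod_cast hcnt
  · intro hB p hp
    obtain ⟨k, hk, rfl⟩ := (PySem.List.mem_enumerate_iff _ _ _).mp hp
    obtain ⟨c, hc', hcnt⟩ := hB _ (ls.getElem_mem hk)
    rw [hc c] at hcnt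
    have h2 : 2 ≤ ls.countP (fun w => w.contains c) := by exact_mod_cast hcnt
    simpa using (inner_iff_count ls k hk).mpr ⟨c, hc', h2⟩

-- ===== VERDICT (by name: the statement is the Claim_ definition above) =====
theorem has_matching_letters_spec : Claim_equal_has_matching_letters := by
  intro words _
  exact main_eq words
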